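-- pv_equiv track=rewrite | github.com/AugPro/Daily-Coding-Problem | Google/e017.py | get_tier_len
-- ===== SOURCE A (Python) =====
-- def get_tier_len(line):
--     tier = 0
--     for char in line:
--         if char == '\t':
--             tier += 1
--         else:
--             return (tier, len(line)-tier) # len(str) is O(1)
--     return (tier, 0)
-- ===== SOURCE B (Python) =====
-- def get_tier_len(line):
--     stripped = line.lstrip('\t')
--     tier = len(line) - len(stripped)
--     return (tier, len(stripped))
-- ===== Notes on version B (the rewrite author's own statement) =====
-- stated objective: idiomatic
-- what changed: Replaces the explicit per-character loop with its if/else and two return points by a single lstrip('\t') call, deriving both tuple components from the stripped suffix's length.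
import Mathlib
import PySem

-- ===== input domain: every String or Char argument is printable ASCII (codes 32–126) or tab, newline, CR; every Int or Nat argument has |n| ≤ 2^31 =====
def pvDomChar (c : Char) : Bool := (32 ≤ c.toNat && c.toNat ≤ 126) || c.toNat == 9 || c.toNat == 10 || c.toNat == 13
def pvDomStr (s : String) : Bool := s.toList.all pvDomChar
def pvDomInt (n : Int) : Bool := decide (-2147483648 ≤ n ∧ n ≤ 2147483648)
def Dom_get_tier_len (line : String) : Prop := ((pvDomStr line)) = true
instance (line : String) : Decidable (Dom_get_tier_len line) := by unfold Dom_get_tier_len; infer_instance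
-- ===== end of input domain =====

-- B replaces A's explicit loop/branch/dual-return with one lstrip('\t') call (idiomatic, same cost).

-- ===== PORT A =====
-- A's for-loop over the characters, carrying the running tier; n is len(line), fixed.
def getTierLenLoop (cs : List Char) (tier : Int) (n : Int) : Int × Int :=
  match cs with
  | [] => (tier, 0)
  | c :: rest => if c = '\t' then getTierLenLoop rest (tier + 1) n else (tier, n - tier)

def get_tier_len (line : String) : Int × Int :=
  getTierLenLoop line.toList 0 (line.toList.length : Int)

-- ===== PORT B =====
def get_tier_len_alt (line : String) : Int × Int :=
  let stripped := line.toList.dropWhile (fun c => c = '\t')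
  let tier : Int := (line.toList.length : Int) - (stripped.length : Int)
  (tier, (stripped.length : Int))

-- ===== PRECONDITION & SPEC =====
def Spec_get_tier_len (line : String) (out : Int × Int) : Prop := out = get_tier_len_alt line
instance (line : String) (out : Int × Int) : Decidable (Spec_get_tier_len line out) := by unfold Spec_get_tier_len; infer_instance

-- ===== CLAIM (what is proved, stated in full; the proofs are below) =====
def Claim_equal_get_tier_len : Prop := ∀ (line : String), Dom_get_tier_len line → Spec_get_tier_len line (get_tier_len line)

-- ===== LEMMAS AND PROOFS =====
lemma getTierLenLoop_eq (cs : List Char) (tier : Int) :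
    getTierLenLoop cs tier (tier + (cs.length : Int)) =
      (tier + ((cs.length : Int) - ((cs.dropWhile (fun c => c = '\t')).length : Int)),
       ((cs.dropWhile (fun c => c = '\t')).length : Int)) := by
  induction cs generalizing tier with
  | nil => simp [getTierLenLoop]
  | cons c rest ih =>
    by_cases h : c = '\t'
    · have h2 := ih (tier + 1)
      simp only [getTierLenLoop, if_pos, List.dropWhile, h, decide_true,
        List.length_cons]
      rw [show tier + (((rest.length : Nat) + 1 : Nat) : Int) = (tier + 1) + (rest.length : Int) by
        push_cast; ring]
      rw [h2]
      congr 1 <;> push_cast <;> ring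
    · simp only [getTierLenLoop, if_neg h, List.dropWhile, List.length_cons, h, decide_false]
      push_cast
      ring_nf

-- ===== VERDICT (by name: the statement is the Claim_ definition above) =====
theorem get_tier_len_spec : Claim_equal_get_tier_len := by
  intro line _
  unfold Spec_get_tier_len get_tier_len get_tier_len_alt
  have h := getTierLenLoop_eq line.toList 0
  simp only [zero_add] at h
  rw [h]
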